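-- pv_equiv track=rewrite | github.com/baconlang/python | examples/grocery-stock/index.py | evaluator_a
-- ===== SOURCE A (Python) =====
-- def get_food_leopard_data():
--     return dict(
--         tomato=5,
--         lemon=6,
--         lime=2,
--         hotdog_bun=4,
--         hotdog=2,
--         hamburger_bun=6,
--         hamburger=3,
--         open=False,
--     )
--
-- def get_harry_peters_data():
--     return dict(
--         tomato=2,
--         lemon=0,
--         lime=4,
--         hotdog_bun=0,
--         hotdog=5,
--         hamburger_bun=2,
--         hamburger=6,
--         open=True,
--     )
--
-- def evaluator_a(elements):
--     # Modeling the store "harry_peters" being closed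
--     if 'harry_peters' in elements:
--         data = get_harry_peters_data()
--
--     elif 'food_leopard' in elements:
--         data = get_food_leopard_data()
--
--     # We only want to evaluate statements that we have data for
--     # i.e. one of the two stores
--     else:
--         return True
--
--     for element in elements:
--         # Acounting for the "food_leopard" symbol
--         if element == 'food_leopard' or element == 'harry_peters':
--             continue
--
--         # Check for the item being in stock
--         if data.get(element):
--             # Reduce stock and continue evaluation of the given expression
--             data[element] -= 1
--             continue
--
--         # Not in stock, expression is falsey
--         else:
--             return False
--
--     # If all symbols were evaluated correctly, we return True
--     return True
-- ===== SOURCE B (Python) =====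
-- def get_food_leopard_data():
--     return dict(
--         tomato=5,
--         lemon=6,
--         lime=2,
--         hotdog_bun=4,
--         hotdog=2,
--         hamburger_bun=6,
--         hamburger=3,
--         open=False,
--     )
--
-- def get_harry_peters_data():
--     return dict(
--         tomato=2,
--         lemon=0,
--         lime=4,
--         hotdog_bun=0,
--         hotdog=5,
--         hamburger_bun=2,
--         hamburger=6,
--         open=True,
--     )
--
-- def evaluator_a(elements):
--     # Same store-selection guard as before
--     if 'harry_peters' in elements:
--         data = get_harry_peters_data()
--     elif 'food_leopard' in elements:
--         data = get_food_leopard_data()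
--     else:
--         return True
--     # Aggregate: count requested items once, then verify stock in one pass
--     counts = {}
--     for e in elements:
--         if e not in ('food_leopard', 'harry_peters'):
--             counts[e] = counts.get(e, 0) + 1
--     return all(n <= data.get(k, 0) for k, n in counts.items())
-- ===== Notes on version B (the rewrite author's own statement) =====
-- stated objective: alternative
-- what changed: Replaces the interleaved per-item decrement loop with early exit by an aggregate pass: build a frequency table of the requested items once, then check every count against the store's stock in one all() pass.
import Mathlib
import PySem

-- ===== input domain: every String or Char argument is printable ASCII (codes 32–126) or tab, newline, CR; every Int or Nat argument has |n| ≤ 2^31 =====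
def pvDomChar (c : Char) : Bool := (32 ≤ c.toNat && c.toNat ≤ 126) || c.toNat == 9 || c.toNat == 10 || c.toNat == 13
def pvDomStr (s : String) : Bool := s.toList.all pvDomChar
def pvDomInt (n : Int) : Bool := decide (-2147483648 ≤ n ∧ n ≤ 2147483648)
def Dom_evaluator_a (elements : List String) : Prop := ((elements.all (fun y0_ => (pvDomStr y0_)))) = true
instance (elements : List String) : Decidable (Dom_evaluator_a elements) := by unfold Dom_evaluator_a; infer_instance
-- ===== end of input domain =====

-- B replaces A's interleaved decrement-and-check loop by counting requested items once
-- and verifying every count against stock in one aggregate pass (alternative, same cost).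
-- Python booleans in the stock dicts behave exactly as the integers 1/0 here, so both
-- ports model the dict values as Int.

-- ===== PORT A =====
def pvFoodLeopardData : PySem.Dict String Int :=
  PySem.Dict.ofList [("tomato", 5), ("lemon", 6), ("lime", 2), ("hotdog_bun", 4),
                     ("hotdog", 2), ("hamburger_bun", 6), ("hamburger", 3), ("open", 0)]

def pvHarryPetersData : PySem.Dict String Int :=
  PySem.Dict.ofList [("tomato", 2), ("lemon", 0), ("lime", 4), ("hotdog_bun", 0),
                     ("hotdog", 5), ("hamburger_bun", 2), ("hamburger", 6), ("open", 1)]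

-- A's for-loop: per element, skip store symbols, check truthiness of data.get(element),
-- decrement stock, early-exit False when out of stock.
def pvEvalLoopA (data : PySem.Dict String Int) : List String → Bool
  | [] => true
  | e :: rest =>
    if e = "food_leopard" ∨ e = "harry_peters" then pvEvalLoopA data rest
    else if data.getD e 0 ≠ 0 then
      pvEvalLoopA (data.insert e (data.getD e 0 - 1)) rest
    else false

def evaluator_a (elements : List String) : Bool :=
  if elements.contains "harry_peters" then pvEvalLoopA pvHarryPetersData elements
  else if elements.contains "food_leopard" then pvEvalLoopA pvFoodLeopardData elements
  else true

-- ===== PORT B =====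
-- B's counting loop: counts[e] = counts.get(e, 0) + 1 for each non-store element.
def pvCountsB (elements : List String) : PySem.Dict String Int :=
  elements.foldl
    (fun d e => if e = "food_leopard" ∨ e = "harry_peters" then d
                else d.insert e (d.getD e 0 + 1))
    PySem.Dict.empty

def pvCheckB (data : PySem.Dict String Int) (elements : List String) : Bool :=
  ((pvCountsB elements).items).all (fun p => p.2 ≤ data.getD p.1 0)

def evaluator_a_alt (elements : List String) : Bool :=
  if elements.contains "harry_peters" then pvCheckB pvHarryPetersData elements
  else if elements.contains "food_leopard" then pvCheckB pvFoodLeopardData elements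
  else true

-- ===== PRECONDITION & SPEC =====
def Spec_evaluator_a (elements : List String) (out : Bool) : Prop := out = evaluator_a_alt elements
instance (elements : List String) (out : Bool) : Decidable (Spec_evaluator_a elements out) := by unfold Spec_evaluator_a; infer_instance

-- ===== CLAIM (what is proved, stated in full; the proofs are below) =====
def Claim_equal_evaluator_a : Prop := ∀ (elements : List String), Dom_evaluator_a elements → Spec_evaluator_a elements (evaluator_a elements)

-- ===== LEMMAS AND PROOFS =====

-- the non-store predicate
def pvKeep (e : String) : Bool := !(e = "food_leopard" || e = "harry_peters")

lemma pv_nonneg_getD (d : PySem.Dict String Int) (h : ∀ v ∈ d.values, 0 ≤ v) (k : String) :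
    0 ≤ d.getD k 0 := by
  cases hc : d.get? k with
  | none => rw [PySem.Dict.getD_of_get?_eq_none d 0 hc]
  | some v =>
    rw [PySem.Dict.getD_of_get?_eq_some d 0 hc]
    have hm := PySem.Dict.mem_items_of_get?_eq_some d hc
    apply h
    simp only [PySem.Dict.values]
    exact List.mem_map.mpr ⟨(k, v), hm, rfl⟩

lemma pv_count_cons (k e : String) (l : List String) :
    List.count k (e :: l) = List.count k l + (if k = e then 1 else 0) := by
  by_cases h : k = e
  · subst h; simp
  · simp [h, Ne.symm h]

-- A's loop computes exactly "every kept element's multiplicity fits the stock"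
lemma pv_loopA_eq (es : List String) : ∀ (data : PySem.Dict String Int),
    (∀ k, 0 ≤ data.getD k 0) →
    pvEvalLoopA data es =
      decide (∀ k ∈ es.filter pvKeep, ((es.filter pvKeep).count k : Int) ≤ data.getD k 0) := by
  induction es with
  | nil => intro data _; simp [pvEvalLoopA]
  | cons e rest ih =>
    intro data hnn
    by_cases hs : e = "food_leopard" ∨ e = "harry_peters"
    · have hk : pvKeep e = false := by simp [pvKeep]; tauto
      simp only [pvEvalLoopA, if_pos hs, List.filter_cons, hk, if_false, Bool.false_eq_true]
      exact ih data hnn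
    · have hk : pvKeep e = true := by simp [pvKeep]; tauto
      have hfc : (e :: rest).filter pvKeep = e :: rest.filter pvKeep := by
        rw [List.filter_cons, if_pos hk]
      by_cases hz : data.getD e 0 = 0
      · simp only [pvEvalLoopA, if_neg hs]
        rw [if_neg (not_not_intro hz)]
        have hnot : ¬ (∀ k ∈ (e :: rest).filter pvKeep,
            (((e :: rest).filter pvKeep).count k : Int) ≤ data.getD k 0) := by
          intro hall
          have he : e ∈ (e :: rest).filter pvKeep := by rw [hfc]; exact List.mem_cons_self ..
          have h1 := hall e he
          have hcnt : 0 < ((e :: rest).filter pvKeep).count e := List.count_pos_iff.mpr he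
          rw [hz] at h1
          omega
        exact (decide_eq_false hnot).symm
      · have hnn' : ∀ k, 0 ≤ (data.insert e (data.getD e 0 - 1)).getD k 0 := by
          intro k
          rw [PySem.Dict.getD_insert]
          split
          · have := hnn e; omega
          · exact hnn k
        simp only [pvEvalLoopA, if_neg hs]
        rw [if_pos hz, ih _ hnn']
        apply Bool.decide_congr
        have hv1 : 1 ≤ data.getD e 0 := by have := hnn e; omega
        constructor
        · intro hall k hm
          rw [hfc] at hm ⊢
          rw [pv_count_cons]
          by_cases hke : k = e
          · subst hke
            have hle : ((rest.filter pvKeep).count k : Int) ≤ data.getD k 0 - 1 := by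
              by_cases hmem : k ∈ rest.filter pvKeep
              · have h2 := hall k hmem
                rw [PySem.Dict.getD_insert, if_pos rfl] at h2
                exact h2
              · rw [List.count_eq_zero_of_not_mem hmem]; push_cast; omega
            rw [if_pos rfl]
            push_cast
            omega
          · have hm' : k ∈ rest.filter pvKeep := by
              cases List.mem_cons.mp hm with
              | inl h => exact absurd h hke
              | inr h => exact h
            have h2 := hall k hm'
            rw [PySem.Dict.getD_insert, if_neg hke] at h2
            rw [if_neg hke]
            push_cast at h2 ⊢
            omega
        · intro hall k hm
          rw [PySem.Dict.getD_insert]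
          by_cases hke : k = e
          · subst hke
            rw [if_pos rfl]
            have h2 := hall k (by rw [hfc]; exact List.mem_cons_self ..)
            rw [hfc, pv_count_cons, if_pos rfl] at h2
            push_cast at h2
            omega
          · rw [if_neg hke]
            have h2 := hall k (by rw [hfc]; exact List.mem_cons_of_mem _ hm)
            rw [hfc, pv_count_cons, if_neg hke] at h2
            omega

-- B's counting loop is the Counter of the kept elements
lemma pv_countsB_eq (es : List String) :
    pvCountsB es = PySem.Dict.counter (es.filter pvKeep) := by
  rw [pvCountsB, ← PySem.Dict.foldl_insert_getD_add_one_eq_counter, List.foldl_filter]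
  apply PySem.List.foldl_congr_mem
  intro d e _
  by_cases hs : e = "food_leopard" ∨ e = "harry_peters" <;>
    · simp only [pvKeep]
      simp [hs]
      tauto

-- B's check computes the same decide as A's loop characterisation
lemma pv_checkB_eq (data : PySem.Dict String Int) (es : List String) :
    pvCheckB data es =
      decide (∀ k ∈ es.filter pvKeep, ((es.filter pvKeep).count k : Int) ≤ data.getD k 0) := by
  rw [pvCheckB, pv_countsB_eq, PySem.Dict.items_counter, List.all_map]
  rw [Bool.eq_iff_iff]
  simp only [List.all_eq_true, decide_eq_true_eq, Function.comp]
  constructor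
  · intro hall k hm
    exact hall k ((PySem.Set.mem_ofList _ k).mpr hm)
  · intro hall k hm
    exact hall k ((PySem.Set.mem_ofList _ k).mp hm)

lemma pv_values_nonneg_hp : ∀ k, 0 ≤ pvHarryPetersData.getD k 0 := by
  apply pv_nonneg_getD
  decide

lemma pv_values_nonneg_fl : ∀ k, 0 ≤ pvFoodLeopardData.getD k 0 := by
  apply pv_nonneg_getD
  decide

-- ===== VERDICT (by name: the statement is the Claim_ definition above) =====
theorem evaluator_a_spec : Claim_equal_evaluator_a := by
  intro elements _
  unfold Spec_evaluator_a evaluator_a evaluator_a_alt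
  split
  · rw [pv_loopA_eq _ _ pv_values_nonneg_hp, pv_checkB_eq]
  · split
    · rw [pv_loopA_eq _ _ pv_values_nonneg_fl, pv_checkB_eq]
    · rfl
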